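-- pv_equiv track=rewrite | github.com/achraflazrak01/cryptolib | src/cryptolib/classical/playfair/helpers.py | prepare_pairs
-- ===== SOURCE A (Python) =====
-- def prepare_pairs(text: str) -> list[tuple[str, str]]:
--     """
--     A-Z only, J -> I. Split into digraphs; if a pair has same letters, insert 'X';
--     if last is single, pad with 'X'.
--     """
--     s = "".join(ch for ch in text.upper() if "A" <= ch <= "Z").replace("J", "I")
--     pairs: list[tuple[str, str]] = []
--     i = 0
--     while i < len(s):
--         a = s[i]
--         if i + 1 == len(s):            # last single -> pad X
--             pairs.append((a, "X"))
--             i += 1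
--             continue
--         b = s[i + 1]
--         if a == b:                     # double letter -> insert X
--             pairs.append((a, "X"))
--             i += 1
--         else:
--             pairs.append((a, b))
--             i += 2
--     return pairs
-- ===== SOURCE B (Python) =====
-- def prepare_pairs(text: str) -> list[tuple[str, str]]:
--     s = "".join(ch for ch in text.upper() if "A" <= ch <= "Z").replace("J", "I")
--     # one-pass X insertion with parity state
--     t: list[str] = []
--     for c in s:
--         if len(t) % 2 == 1 and t[-1] == c:
--             t.append("X")
--         t.append(c)
--     if len(t) % 2 == 1:
--         t.append("X")
--     # separate chunking pass
--     return [(t[i], t[i + 1]) for i in range(0, len(t), 2)]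
-- ===== Notes on version B (the rewrite author's own statement) =====
-- stated objective: alternative
-- what changed: Replaces A's index-jumping while loop (which emits pairs directly, advancing by 1 or 2) with a two-phase decomposition: a single-character fold with parity state that inserts the padding 'X's into a flat character list, followed by a separate chunking pass that pairs consecutive characters.
import Mathlib
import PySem

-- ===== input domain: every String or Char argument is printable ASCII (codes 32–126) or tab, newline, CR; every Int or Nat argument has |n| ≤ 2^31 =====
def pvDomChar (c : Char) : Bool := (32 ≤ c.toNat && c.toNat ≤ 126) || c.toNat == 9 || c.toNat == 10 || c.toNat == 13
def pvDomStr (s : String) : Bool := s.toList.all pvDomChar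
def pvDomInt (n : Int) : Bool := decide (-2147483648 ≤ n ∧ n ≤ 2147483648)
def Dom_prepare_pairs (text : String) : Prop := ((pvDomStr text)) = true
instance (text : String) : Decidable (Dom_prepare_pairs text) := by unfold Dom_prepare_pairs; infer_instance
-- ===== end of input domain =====

-- B separates X-insertion (a single-character fold with parity state) from pairing (a chunking
-- pass), replacing A's index-jumping while loop; objective: alternative decomposition, same cost.

-- s = "".join(ch for ch in text.upper() if "A" <= ch <= "Z").replace("J", "I")
-- (identical first line of both Pythons, shared by both ports)
def pvNorm (text : String) : List Char :=
  PySem.Chars.replace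
    ((PySem.Chars.upper text.toList).filter (fun ch => decide ('A' ≤ ch) && decide (ch ≤ 'Z')))
    ['J'] ['I']

-- ===== PORT A =====
-- A's while loop over index i, as structural recursion on the remaining characters
def pvLoopA : List Char → List (String × String)
  | [] => []
  | [a] => [(String.ofList [a], "X")]                                   -- last single -> pad X
  | a :: b :: rest =>
      if a = b then (String.ofList [a], "X") :: pvLoopA (b :: rest)     -- double letter -> insert X (i += 1)
      else (String.ofList [a], String.ofList [b]) :: pvLoopA rest           -- i += 2

def prepare_pairs (text : String) : List (String × String) :=
  pvLoopA (pvNorm text)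

-- ===== PORT B =====
-- loop body: if len(t) % 2 == 1 and t[-1] == c: t.append("X"); then t.append(c)
def pvStepB (t : List Char) (c : Char) : List Char :=
  if t.length % 2 = 1 ∧ t.getLast? = some c then t ++ ['X', c] else t ++ [c]

-- [(t[i], t[i+1]) for i in range(0, len(t), 2)] — t always has even length here (exact on even length)
def pvChunkB : List Char → List (String × String)
  | x :: y :: rest => (String.ofList [x], String.ofList [y]) :: pvChunkB rest
  | _ => []

def prepare_pairs_alt (text : String) : List (String × String) :=
  let t := (pvNorm text).foldl pvStepB []
  let t := if t.length % 2 = 1 then t ++ ['X'] else t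
  pvChunkB t

-- ===== PRECONDITION & SPEC =====
def Spec_prepare_pairs (text : String) (out : List (String × String)) : Prop := out = prepare_pairs_alt text
instance (text : String) (out : List (String × String)) : Decidable (Spec_prepare_pairs text out) := by unfold Spec_prepare_pairs; infer_instance

-- ===== CLAIM (what is proved, stated in full; the proofs are below) =====
def Claim_equal_prepare_pairs : Prop := ∀ (text : String), Dom_prepare_pairs text → Spec_prepare_pairs text (prepare_pairs text)

-- ===== LEMMAS AND PROOFS =====

-- pad-then-chunk, as one function of the fold's result
def pvFinishB (t : List Char) : List (String × String) :=
  pvChunkB (if t.length % 2 = 1 then t ++ ['X'] else t)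

-- the fold ignores an even-length prefix already emitted (u is the ≤1-char open digraph)
theorem pvFoldB_split (s : List Char) : ∀ (t u : List Char), t.length % 2 = 0 → u.length ≤ 1 →
    List.foldl pvStepB (t ++ u) s = t ++ List.foldl pvStepB u s := by
  induction s with
  | nil => intro t u _ _; rfl
  | cons c cs ih =>
    intro t u ht hu
    match u with
    | [] =>
      have h1 : pvStepB (t ++ []) c = t ++ [c] := by
        simp only [pvStepB, List.append_nil]
        rw [if_neg]; rintro ⟨h, -⟩; omega
      have h2 : pvStepB [] c = [c] := rfl
      simp only [List.foldl_cons, h1, h2]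
      exact ih t [c] ht (by simp)
    | [d] =>
      have hlast : (t ++ [d]).getLast? = some d := by simp
      have hodd : (t ++ [d]).length % 2 = 1 := by simp; omega
      by_cases hdc : d = c
      · have h1 : pvStepB (t ++ [d]) c = (t ++ [d, 'X']) ++ [c] := by
          simp only [pvStepB]
          rw [if_pos ⟨hodd, by rw [hlast, hdc]⟩]; simp
        have h2 : pvStepB [d] c = [d, 'X'] ++ [c] := by
          simp only [pvStepB]
          rw [if_pos ⟨by simp, by simp [hdc]⟩]; rfl
        simp only [List.foldl_cons, h1, h2]
        rw [ih (t ++ [d, 'X']) [c] (by simp; omega) (by simp),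
            ih [d, 'X'] [c] (by simp) (by simp)]
        simp
      · have h1 : pvStepB (t ++ [d]) c = (t ++ [d, c]) ++ [] := by
          simp only [pvStepB]
          rw [if_neg]; · simp
          rintro ⟨-, h⟩; rw [hlast] at h; exact hdc (Option.some.inj h)
        have h2 : pvStepB [d] c = [d, c] ++ [] := by
          simp only [pvStepB]
          rw [if_neg]; · simp
          rintro ⟨-, h⟩; exact hdc (Option.some.inj (by simpa using h))
        simp only [List.foldl_cons, h1, h2]
        rw [ih (t ++ [d, c]) [] (by simp; omega) (by simp),
            ih [d, c] [] (by simp) (by simp)]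
        simp
    | _ :: _ :: _ => simp at hu

theorem pvFinishB_cons_cons (x y : Char) (f : List Char) :
    pvFinishB ([x, y] ++ f) = (String.ofList [x], String.ofList [y]) :: pvFinishB f := by
  unfold pvFinishB
  have hpar : ([x, y] ++ f).length % 2 = f.length % 2 := by simp; omega
  rw [hpar]
  by_cases h : f.length % 2 = 1 <;> simp [h, pvChunkB]

-- A's loop computes B's finish of B's fold
theorem pvLoopA_eq (s : List Char) : pvLoopA s = pvFinishB (List.foldl pvStepB [] s) := by
  match s with
  | [] => rfl
  | [a] => rfl
  | a :: b :: rest =>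
    by_cases hab : a = b
    · have hfold : List.foldl pvStepB [] (a :: b :: rest)
          = [a, 'X'] ++ List.foldl pvStepB [] (b :: rest) := by
        have h1 : pvStepB [a] b = [a, 'X'] ++ [b] := by
          simp only [pvStepB]
          rw [if_pos ⟨by simp, by simp [hab]⟩]; rfl
        simp only [List.foldl_cons]
        rw [show pvStepB [] a = [a] from rfl, h1,
            pvFoldB_split rest [a, 'X'] [b] (by simp) (by simp)]
        rfl
      rw [pvLoopA, if_pos hab, hfold, pvFinishB_cons_cons, pvLoopA_eq (b :: rest), hab]
    · have hfold : List.foldl pvStepB [] (a :: b :: rest)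
          = [a, b] ++ List.foldl pvStepB [] rest := by
        have h1 : pvStepB [a] b = [a, b] ++ [] := by
          simp only [pvStepB]
          rw [if_neg]; · simp
          rintro ⟨-, h⟩; exact hab (Option.some.inj (by simpa using h))
        simp only [List.foldl_cons]
        rw [show pvStepB [] a = [a] from rfl, h1,
            pvFoldB_split rest [a, b] [] (by simp) (by simp)]
      rw [pvLoopA, if_neg hab, hfold, pvFinishB_cons_cons, pvLoopA_eq rest]
termination_by s.length

-- ===== VERDICT (by name: the statement is the Claim_ definition above) =====
theorem prepare_pairs_spec : Claim_equal_prepare_pairs := by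
  intro text _
  show prepare_pairs text = prepare_pairs_alt text
  rw [prepare_pairs, prepare_pairs_alt, pvLoopA_eq]
  rfl
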